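-- pv_equiv track=rewrite | github.com/TrueOdds-Analytics/UFC | src/models/create_predictions/main.py | create_result_columns
-- ===== SOURCE A (Python) =====
-- def create_result_columns(n_past_fights, tester):
--     """Generate column names for fight result columns."""
--     results_columns = []
--     for i in range(1, tester + 1):
--         results_columns += [
--             f"result_fight_{i}", f"winner_fight_{i}", f"weight_class_fight_{i}", f"scheduled_rounds_fight_{i}",
--             f"result_b_fight_{i}", f"winner_b_fight_{i}", f"weight_class_b_fight_{i}",
--             f"scheduled_rounds_b_fight_{i}"
--         ]
--     return results_columns
-- ===== SOURCE B (Python) =====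
-- def create_result_columns(n_past_fights, tester):
--     """Generate column names for fight result columns."""
--     bases = [f + s for s in ("", "_b")
--              for f in ("result", "winner", "weight_class", "scheduled_rounds")]
--     # stage 1: one full column-name list per base field, over all fight indices
--     columns = [[f"{b}_fight_{i}" for i in range(1, tester + 1)] for b in bases]
--     # stage 2: transpose and flatten, interleaving the eight lists fight-by-fight
--     return [name for row in zip(*columns) for name in row]
-- ===== Notes on version B (the rewrite author's own statement) =====
-- stated objective: alternative
-- what changed: B builds eight separate per-base column lists (one per name family, each spanning all fight indices) and then transposes and flattens them with zip(*), instead of A's single pass that appends a hardcoded eight-string literal per fight index.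
import Mathlib
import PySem

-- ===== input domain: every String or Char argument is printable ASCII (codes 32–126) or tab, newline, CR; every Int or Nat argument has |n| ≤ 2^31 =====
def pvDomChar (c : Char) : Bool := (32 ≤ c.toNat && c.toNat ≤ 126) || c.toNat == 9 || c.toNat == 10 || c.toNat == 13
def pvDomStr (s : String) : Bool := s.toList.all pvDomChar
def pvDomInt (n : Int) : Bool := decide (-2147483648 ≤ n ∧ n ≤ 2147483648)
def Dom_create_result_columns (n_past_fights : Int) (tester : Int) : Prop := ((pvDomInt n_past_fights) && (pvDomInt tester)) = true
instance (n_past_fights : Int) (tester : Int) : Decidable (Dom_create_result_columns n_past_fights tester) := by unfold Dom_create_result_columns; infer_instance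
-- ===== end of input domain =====

-- B builds eight per-base column lists over all fight indices and then transposes
-- and flattens them (zip(*)), instead of A's single pass appending an eight-string
-- literal per index; objective: alternative (same cost, different traversal).
-- ===== PORT A =====
def create_result_columns (n_past_fights : Int) (tester : Int) : List String :=
  (PySem.List.pyRange 1 (tester + 1) 1).foldl (fun results_columns i =>
    results_columns ++ [
      "result_fight_" ++ PySem.Int.toStr i, "winner_fight_" ++ PySem.Int.toStr i,
      "weight_class_fight_" ++ PySem.Int.toStr i, "scheduled_rounds_fight_" ++ PySem.Int.toStr i,
      "result_b_fight_" ++ PySem.Int.toStr i, "winner_b_fight_" ++ PySem.Int.toStr i,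
      "weight_class_b_fight_" ++ PySem.Int.toStr i,
      "scheduled_rounds_b_fight_" ++ PySem.Int.toStr i]) []

-- ===== PORT B =====
-- bases = [f + s for s in ("", "_b") for f in (...)]
def pvBases : List String :=
  ["", "_b"].flatMap (fun s =>
    ["result", "winner", "weight_class", "scheduled_rounds"].map (fun f => f ++ s))

-- Python's zip(*columns): rows while every list is nonempty (hand-ported, exact
-- for a nonempty list of lists as used here; zip stops at the shortest list).
def pvZipRows (ls : List (List String)) : List (List String) :=
  if h : ls ≠ [] ∧ ∀ l ∈ ls, l ≠ [] then
    (ls.map (fun l => l.headD "")) :: pvZipRows (ls.map (fun l => l.tail))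
  else []
termination_by (ls.headD []).length
decreasing_by
  obtain ⟨hne, hall⟩ := h
  cases ls with
  | nil => exact absurd rfl hne
  | cons l0 rest =>
    simp only [List.map_cons, List.headD_cons]
    have : l0 ≠ [] := hall l0 (List.mem_cons_self ..)
    cases l0 with
    | nil => exact absurd rfl this
    | cons a as => simp

def create_result_columns_alt (n_past_fights : Int) (tester : Int) : List String :=
  let columns := pvBases.map (fun b =>
    (PySem.List.pyRange 1 (tester + 1) 1).map (fun i => (b ++ "_fight_") ++ PySem.Int.toStr i))
  (pvZipRows columns).flatten

-- ===== PRECONDITION & SPEC =====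
def Spec_create_result_columns (n_past_fights : Int) (tester : Int) (out : List String) : Prop := out = create_result_columns_alt n_past_fights tester
instance (n_past_fights : Int) (tester : Int) (out : List String) : Decidable (Spec_create_result_columns n_past_fights tester out) := by unfold Spec_create_result_columns; infer_instance

-- ===== CLAIM (what is proved, stated in full; the proofs are below) =====
def Claim_equal_create_result_columns : Prop := ∀ (n_past_fights : Int) (tester : Int), Dom_create_result_columns n_past_fights tester → Spec_create_result_columns n_past_fights tester (create_result_columns n_past_fights tester)

-- ===== LEMMAS AND PROOFS =====

-- Transposing equal-length columns built from the same index list r and flattening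
-- yields the row-major flatMap over r.
theorem zipRows_map_flatten (bs : List String) (f : String → Int → String) :
    ∀ r : List Int,
      (pvZipRows (bs.map (fun b => r.map (f b)))).flatten
        = r.flatMap (fun i => bs.map (fun b => f b i)) := by
  intro r
  induction r with
  | nil =>
    rw [pvZipRows]
    cases bs with
    | nil => simp
    | cons b bs' =>
      rw [dif_neg]
      · simp
      · intro ⟨_, hall⟩
        exact hall [] (by simp) rfl
  | cons x xs ih =>
    cases bs with
    | nil =>
      rw [pvZipRows, dif_neg]
      · simp
      · intro ⟨hne, _⟩; exact hne rfl
    | cons b bs' =>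
      rw [pvZipRows, dif_pos]
      · simp only [List.map_map, List.flatMap_cons]
        have hh : ((fun l => l.headD "") ∘ fun b => (x :: xs).map (f b))
            = fun b : String => f b x := by funext b'; simp
        have ht : ((fun l => l.tail) ∘ fun b => (x :: xs).map (f b))
            = fun b : String => xs.map (f b) := by funext b'; simp
        rw [hh, ht, List.flatten_cons, ih]
      · constructor
        · simp
        · intro l hl
          simp only [List.mem_map] at hl
          obtain ⟨b', _, rfl⟩ := hl
          simp

-- The eight names of one fight, as B composes them, equal A's literal block.
theorem block_eq (i : Int) :
    pvBases.map (fun b => (b ++ "_fight_") ++ PySem.Int.toStr i)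
    = ["result_fight_" ++ PySem.Int.toStr i, "winner_fight_" ++ PySem.Int.toStr i,
       "weight_class_fight_" ++ PySem.Int.toStr i, "scheduled_rounds_fight_" ++ PySem.Int.toStr i,
       "result_b_fight_" ++ PySem.Int.toStr i, "winner_b_fight_" ++ PySem.Int.toStr i,
       "weight_class_b_fight_" ++ PySem.Int.toStr i,
       "scheduled_rounds_b_fight_" ++ PySem.Int.toStr i] := by
  have hb : pvBases = ["result", "winner", "weight_class", "scheduled_rounds",
      "result_b", "winner_b", "weight_class_b", "scheduled_rounds_b"] := by decide
  rw [hb]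
  simp only [List.map_cons, List.map_nil,
    show ("result" ++ "_fight_" : String) = "result_fight_" from rfl,
    show ("winner" ++ "_fight_" : String) = "winner_fight_" from rfl,
    show ("weight_class" ++ "_fight_" : String) = "weight_class_fight_" from rfl,
    show ("scheduled_rounds" ++ "_fight_" : String) = "scheduled_rounds_fight_" from rfl,
    show ("result_b" ++ "_fight_" : String) = "result_b_fight_" from rfl,
    show ("winner_b" ++ "_fight_" : String) = "winner_b_fight_" from rfl,
    show ("weight_class_b" ++ "_fight_" : String) = "weight_class_b_fight_" from rfl,
    show ("scheduled_rounds_b" ++ "_fight_" : String) = "scheduled_rounds_b_fight_" from rfl]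

-- ===== VERDICT (by name: the statement is the Claim_ definition above) =====
theorem create_result_columns_spec : Claim_equal_create_result_columns := by
  intro n t _
  unfold Spec_create_result_columns create_result_columns create_result_columns_alt
  rw [PySem.List.foldl_append_eq_flatMap]
  simp only [List.nil_append]
  rw [zipRows_map_flatten]
  exact List.flatMap_congr (fun i _ => (block_eq i).symm)
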